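-- pv_equiv track=rewrite | github.com/ejwang440/derivative-calculator | ddx-ejwang/symbolic.py | is_whole_match
-- ===== SOURCE A (Python) =====
-- def is_whole_match(f):
--   assert(f[0] == "(")
--   cnt = 1
--   i = 1
--   while cnt != 0 and i < len(f):
--     if f[i] == '(':
--       cnt += 1
--     elif f[i] == ')':
--       cnt -= 1
--     i += 1
--   return i == len(f)
-- ===== SOURCE B (Python) =====
-- def is_whole_match(f):
--   assert f[0] == "("
--   depths = []
--   d = 0
--   for c in f:
--     d += (c == '(') - (c == ')')
--     depths.append(d)
--   return all(d > 0 for d in depths[:-1])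
-- ===== Notes on version B (the rewrite author's own statement) =====
-- stated objective: alternative
-- what changed: replaced the early-exit index/counter while-loop with a two-phase computation: build the full running bracket-depth table in one pass, then reduce it with all(d > 0) over all but the last entry
import Mathlib
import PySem

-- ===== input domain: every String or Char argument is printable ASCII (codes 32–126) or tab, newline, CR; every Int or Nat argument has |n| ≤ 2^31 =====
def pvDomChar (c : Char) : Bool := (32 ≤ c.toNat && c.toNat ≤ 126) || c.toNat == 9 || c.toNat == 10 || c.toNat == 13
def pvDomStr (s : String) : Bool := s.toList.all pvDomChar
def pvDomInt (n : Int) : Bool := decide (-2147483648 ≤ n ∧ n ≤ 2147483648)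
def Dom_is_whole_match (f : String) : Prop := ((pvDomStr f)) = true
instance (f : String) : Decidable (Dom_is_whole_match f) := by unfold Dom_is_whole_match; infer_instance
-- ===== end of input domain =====

-- B builds the full running bracket-depth table and reduces it with all(d > 0),
-- instead of A's early-exit counter/index while-loop; same result, same cost (alternative decomposition).

-- ===== PORT A =====
-- A's while-loop: state (cnt, i); f[i] is safe because the loop guard gives i < len(f)
def isWholeLoopA (chars : List Char) (cnt : Int) (i : Nat) : Nat :=
  if cnt ≠ 0 ∧ i < chars.length then
    let cnt' := if chars.getD i ' ' = '(' then cnt + 1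
                else if chars.getD i ' ' = ')' then cnt - 1 else cnt
    isWholeLoopA chars cnt' (i + 1)
  else i
termination_by chars.length - i

def is_whole_match (f : String) : Bool :=
  isWholeLoopA f.toList 1 1 == f.toList.length

-- ===== PORT B =====
def is_whole_match_alt (f : String) : Bool :=
  let depths := (f.toList.foldl
    (fun (acc : List Int × Int) c =>
      let d := acc.2 + ((if c = '(' then (1:Int) else 0) - (if c = ')' then 1 else 0))
      (acc.1 ++ [d], d)) ([], 0)).1
  -- depths[:-1]
  (PySem.List.slice depths none (some (-1))).all (fun d => decide (0 < d))

-- ===== PRECONDITION & SPEC =====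
-- A raises (IndexError on the empty string, AssertionError otherwise) unless the first character is an opening parenthesis; B's assert raises on exactly the same inputs.
def Pre_is_whole_match (f : String) : Prop := f.toList.head? = some '('
instance (f : String) : Decidable (Pre_is_whole_match f) := by unfold Pre_is_whole_match; infer_instance
def pvWitness_is_whole_match : String := "(x)"

def Spec_is_whole_match (f : String) (out : Bool) : Prop := out = is_whole_match_alt f
instance (f : String) (out : Bool) : Decidable (Spec_is_whole_match f out) := by unfold Spec_is_whole_match; infer_instance

-- ===== CLAIM (what is proved, stated in full; the proofs are below) =====
def Claim_equal_is_whole_match : Prop := ∀ (f : String), Dom_is_whole_match f → Pre_is_whole_match f → Spec_is_whole_match f (is_whole_match f)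

-- ===== LEMMAS AND PROOFS =====

/-- depth step of one character -/
def pvDelta (c : Char) : Int := (if c = '(' then (1:Int) else 0) - (if c = ')' then 1 else 0)

/-- A's loop, reformulated over the unread suffix -/
def pvLoopS : List Char → Int → Bool
  | [], _ => true
  | c :: rest, cnt => if cnt = 0 then false else pvLoopS rest (cnt + pvDelta c)

/-- running depths after each character of `l`, starting from depth `d` -/
def pvDepths : List Char → Int → List Int
  | [], _ => []
  | c :: rest, d => (d + pvDelta c) :: pvDepths rest (d + pvDelta c)

theorem pvDepths_ne_nil (c : Char) (rest : List Char) (d : Int) :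
    pvDepths (c :: rest) d ≠ [] := by simp [pvDepths]

/-- A's index loop equals the suffix loop -/
theorem pvLoopA_eq (l : List Char) : ∀ (chars : List Char) (i : Nat) (cnt : Int),
    chars.drop i = l → i ≤ chars.length →
    ((isWholeLoopA chars cnt i == chars.length) : Bool) = pvLoopS l cnt := by
  induction l with
  | nil =>
    intro chars i cnt hd hle
    have hi : i = chars.length := by
      have := congrArg List.length hd
      simp [List.length_drop] at this
      omega
    rw [isWholeLoopA]
    simp [hi, pvLoopS]
  | cons c rest ih =>
    intro chars i cnt hd hle
    have hlen : i < chars.length := by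
      have := congrArg List.length hd
      simp [List.length_drop] at this
      omega
    have hget : chars[i]? = some c := by
      have h0 : (chars.drop i)[0]? = some c := by rw [hd]; rfl
      simpa using h0
    have hgetD : chars.getD i ' ' = c := by
      simp [List.getD, hget]
    have hdrop : chars.drop (i + 1) = rest := by
      have : (chars.drop i).tail = chars.drop (i + 1) := by
        simp [List.tail_drop]
      rw [← this, hd]; rfl
    rw [isWholeLoopA]
    by_cases hc : cnt = 0
    · simp [hc, pvLoopS]
      omega
    · have hstep :
        (if chars.getD i ' ' = '(' then cnt + 1
          else if chars.getD i ' ' = ')' then cnt - 1 else cnt) = cnt + pvDelta c := by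
        rw [hgetD]; unfold pvDelta
        split_ifs with h1 h2 <;> (simp_all; try ring)
      simp only [hc, hlen, not_false_iff, if_pos, ne_eq, and_true]
      rw [hstep]
      rw [ih chars (i + 1) (cnt + pvDelta c) hdrop (by omega)]
      simp [pvLoopS, hc]

/-- the suffix loop with positive count equals positivity of all-but-last of d :: depths -/
theorem pvLoopS_eq_depths : ∀ (l : List Char) (d : Int), 0 < d →
    pvLoopS l d = ((d :: pvDepths l d).dropLast.all (fun x => decide (0 < x))) := by
  intro l
  induction l with
  | nil => intro d hd; simp [pvLoopS, pvDepths]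
  | cons c rest ih =>
    intro d hd
    have hd0 : d ≠ 0 := by omega
    have hδ : -1 ≤ pvDelta c := by
      unfold pvDelta; split_ifs <;> omega
    rw [pvLoopS]
    rw [if_neg hd0]
    rcases lt_or_eq_of_le (show (0:Int) ≤ d + pvDelta c by omega) with hpos | hzero
    · rw [ih (d + pvDelta c) hpos]
      simp [pvDepths, List.dropLast_cons_of_ne_nil, hd]
    · -- d + pvDelta c = 0
      cases rest with
      | nil => simp [pvLoopS, ← hzero, pvDepths, hd]
      | cons c' r' =>
        rw [pvLoopS, if_pos hzero.symm]
        have h1 : pvDepths (c :: c' :: r') d =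
            (d + pvDelta c) :: pvDepths (c' :: r') (d + pvDelta c) := rfl
        rw [h1, ← hzero]
        rw [List.dropLast_cons_of_ne_nil (by simp [pvDepths]),
            List.dropLast_cons_of_ne_nil (pvDepths_ne_nil _ _ _)]
        simp

/-- B's foldl builds acc ++ pvDepths l d -/
theorem pvFold_eq_depths : ∀ (l : List Char) (acc : List Int) (d : Int),
    (l.foldl (fun (acc : List Int × Int) c =>
        let d := acc.2 + ((if c = '(' then (1:Int) else 0) - (if c = ')' then 1 else 0))
        (acc.1 ++ [d], d)) (acc, d)).1 = acc ++ pvDepths l d := by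
  intro l
  induction l with
  | nil => intro acc d; simp [pvDepths]
  | cons c rest ih =>
    intro acc d
    rw [List.foldl_cons]
    rw [ih]
    simp [pvDepths, pvDelta]

-- ===== VERDICT (by name: the statement is the Claim_ definition above) =====
theorem is_whole_match_spec : Claim_equal_is_whole_match := by
  intro f _ hpre
  unfold Spec_is_whole_match is_whole_match is_whole_match_alt
  unfold Pre_is_whole_match at hpre
  obtain ⟨rest, hl⟩ : ∃ rest, f.toList = '(' :: rest := by
    cases h : f.toList with
    | nil => rw [h] at hpre; simp at hpre
    | cons a t => rw [h] at hpre; simp at hpre; exact ⟨t, by rw [hpre]⟩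
  rw [hl]
  rw [List.foldl_cons]
  have hδ : (([]:List Int) ++ [(0:Int) + ((if ('(':Char) = '(' then (1:Int) else 0) - (if ('(':Char) = ')' then 1 else 0))],
      (0:Int) + ((if ('(':Char) = '(' then (1:Int) else 0) - (if ('(':Char) = ')' then 1 else 0)))
      = (([(1:Int)], (1:Int)) : List Int × Int) := by decide
  rw [hδ, pvFold_eq_depths rest [(1:Int)] 1]
  simp only [PySem.List.slice_to_neg_one, List.singleton_append]
  rw [pvLoopA_eq rest ('(' :: rest) 1 1 rfl (by simp)]
  rw [pvLoopS_eq_depths rest 1 (by norm_num)]
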